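-- pv_equiv track=rewrite | github.com/CandyDong/Music-Page-Flip | Candy_Dong/midiTracker/readLiveMidi.py | _findPosInNoteGroups
-- ===== SOURCE A (Python) =====
-- def _findPosInNoteGroups(noteGroups, n):
-- 	numNotes = sum(list(map(lambda x: len(x), noteGroups)))
-- 	if n >= numNotes:
-- 		return None
--
-- 	i, count = 0, 0
-- 	while (i < len(noteGroups)):
-- 		cur = noteGroups[i]
-- 		count += len(cur)
-- 		if (count > n):
-- 			return (i, len(cur) - (count-n))
-- 		i += 1
-- ===== SOURCE B (Python) =====
-- def _findPosInNoteGroups(noteGroups, n):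
-- 	# prefix sums of group lengths, then binary search for the first
-- 	# cumulative count strictly greater than n
-- 	prefix = []
-- 	total = 0
-- 	for g in noteGroups:
-- 		total += len(g)
-- 		prefix.append(total)
-- 	if not prefix or n >= prefix[-1]:
-- 		return None
-- 	lo, hi = 0, len(prefix)
-- 	while lo < hi:
-- 		mid = (lo + hi) // 2
-- 		if prefix[mid] > n:
-- 			hi = mid
-- 		else:
-- 			lo = mid + 1
-- 	return (lo, n - (prefix[lo] - len(noteGroups[lo])))
-- ===== Notes on version B (the rewrite author's own statement) =====
-- stated objective: alternative
-- what changed: Replaces A's single linear scan with a running counter by building a prefix-sum list of cumulative group lengths and binary-searching it for the first cumulative count strictly greater than n.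
import Mathlib
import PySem

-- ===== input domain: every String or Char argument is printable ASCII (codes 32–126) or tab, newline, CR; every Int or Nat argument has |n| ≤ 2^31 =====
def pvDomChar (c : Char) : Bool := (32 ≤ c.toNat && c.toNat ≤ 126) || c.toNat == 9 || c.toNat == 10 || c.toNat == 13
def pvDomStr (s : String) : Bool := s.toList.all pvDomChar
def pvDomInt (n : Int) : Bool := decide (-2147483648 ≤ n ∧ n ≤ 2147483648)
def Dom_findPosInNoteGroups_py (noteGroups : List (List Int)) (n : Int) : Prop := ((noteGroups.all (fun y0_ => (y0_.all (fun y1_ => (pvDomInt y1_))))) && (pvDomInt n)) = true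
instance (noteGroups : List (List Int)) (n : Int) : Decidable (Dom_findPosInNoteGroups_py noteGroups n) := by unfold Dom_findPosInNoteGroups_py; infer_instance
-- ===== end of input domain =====

-- B replaces A's linear scan by prefix sums of group lengths plus a binary
-- search for the first cumulative count exceeding n (objective: alternative).

-- ===== PORT A =====
-- the while loop of A: i is the group index, count the running note count
def goA_findPos (gs : List (List Int)) (n : Int) (i : Int) (count : Int) : Option (Int × Int) :=
  match gs with
  | [] => none
  | cur :: rest =>
    let count' := count + (cur.length : Int)
    if count' > n then some (i, (cur.length : Int) - (count' - n))
    else goA_findPos rest n (i + 1) count'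

def findPosInNoteGroups_py (noteGroups : List (List Int)) (n : Int) : Option (Int × Int) :=
  let numNotes : Int := (noteGroups.map (fun x => (x.length : Int))).sum
  if n ≥ numNotes then none
  else goA_findPos noteGroups n 0 0

-- ===== PORT B =====
-- the for loop of B building the prefix list (total is the accumulator)
def prefixB (gs : List (List Int)) (total : Int) : List Int :=
  match gs with
  | [] => []
  | g :: rest => (total + (g.length : Int)) :: prefixB rest (total + (g.length : Int))

-- the binary-search while loop of B (lo, hi, mid are nonnegative Python ints)
def bsB (pfx : List Int) (n : Int) (lo hi : Nat) : Nat :=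
  if _h : lo < hi then
    let mid := (lo + hi) / 2
    if pfx.getD mid 0 > n then bsB pfx n lo mid
    else bsB pfx n (mid + 1) hi
  else lo
termination_by hi - lo
decreasing_by
  · omega
  · omega

def findPosInNoteGroups_py_alt (noteGroups : List (List Int)) (n : Int) : Option (Int × Int) :=
  let pfx := prefixB noteGroups 0
  match pfx.getLast? with
  | none => none
  | some last =>
    if n ≥ last then none
    else
      let lo := bsB pfx n 0 pfx.length
      -- pfx[lo] and noteGroups[lo] are in-range list accesses
      some ((lo : Int), n - (pfx.getD lo 0 - ((noteGroups.getD lo []).length : Int)))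

-- ===== PRECONDITION & SPEC =====
def Spec_findPosInNoteGroups_py (noteGroups : List (List Int)) (n : Int) (out : Option (Int × Int)) : Prop := out = findPosInNoteGroups_py_alt noteGroups n
instance (noteGroups : List (List Int)) (n : Int) (out : Option (Int × Int)) : Decidable (Spec_findPosInNoteGroups_py noteGroups n out) := by unfold Spec_findPosInNoteGroups_py; infer_instance

-- ===== CLAIM (what is proved, stated in full; the proofs are below) =====
def Claim_equal_findPosInNoteGroups_py : Prop := ∀ (noteGroups : List (List Int)) (n : Int), Dom_findPosInNoteGroups_py noteGroups n → Spec_findPosInNoteGroups_py noteGroups n (findPosInNoteGroups_py noteGroups n)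

-- ===== LEMMAS AND PROOFS =====

-- proof-side helpers
def sumLens (gs : List (List Int)) : Int := (gs.map (fun x => (x.length : Int))).sum

-- number of leading prefix entries ≤ n (= index of the first entry > n)
def cntLE (l : List Int) (n : Int) : Nat :=
  match l with
  | [] => 0
  | c :: rest => if c ≤ n then cntLE rest n + 1 else 0

theorem length_prefixB (gs : List (List Int)) (t : Int) :
    (prefixB gs t).length = gs.length := by
  induction gs generalizing t with
  | nil => simp [prefixB]
  | cons g rest ih => simp [prefixB, ih]

theorem getLast?_prefixB (gs : List (List Int)) (t : Int) (hne : gs ≠ []) :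
    (prefixB gs t).getLast? = some (t + sumLens gs) := by
  induction gs generalizing t with
  | nil => exact absurd rfl hne
  | cons g rest ih =>
    cases rest with
    | nil => simp [prefixB, sumLens]
    | cons h hs =>
      rw [prefixB]
      rw [show prefixB (h :: hs) (t + (g.length : Int)) =
        (t + (g.length : Int) + (h.length : Int)) ::
          prefixB hs (t + (g.length : Int) + (h.length : Int)) from rfl]
      rw [List.getLast?_cons_cons]
      have ihe := ih (t + (g.length : Int)) (by simp)
      rw [show prefixB (h :: hs) (t + (g.length : Int)) =
        (t + (g.length : Int) + (h.length : Int)) ::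
          prefixB hs (t + (g.length : Int) + (h.length : Int)) from rfl] at ihe
      rw [ihe]
      simp only [sumLens, List.map_cons, List.sum_cons]
      congr 1
      ring

theorem lb_prefixB (gs : List (List Int)) (t : Int) (k : Nat) (hk : k < gs.length) :
    t ≤ (prefixB gs t).getD k 0 := by
  induction gs generalizing t k with
  | nil => simp at hk
  | cons g rest ih =>
    cases k with
    | zero =>
      simp only [prefixB, List.getD_cons_zero]
      have : (0 : Int) ≤ (g.length : Int) := by positivity
      omega
    | succ k' =>
      simp only [prefixB, List.getD_cons_succ]
      have h1 := ih (t + (g.length : Int)) k' (by simpa using hk)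
      have h2 : (0 : Int) ≤ (g.length : Int) := by positivity
      omega

theorem mono_prefixB (gs : List (List Int)) (t : Int) (j k : Nat)
    (hjk : j ≤ k) (hk : k < gs.length) :
    (prefixB gs t).getD j 0 ≤ (prefixB gs t).getD k 0 := by
  induction gs generalizing t j k with
  | nil => simp at hk
  | cons g rest ih =>
    cases j with
    | zero =>
      cases k with
      | zero => simp
      | succ k' =>
        simp only [prefixB, List.getD_cons_zero, List.getD_cons_succ]
        exact lb_prefixB rest _ k' (by simpa using hk)
    | succ j' =>
      cases k with
      | zero => omega
      | succ k' =>
        simp only [prefixB, List.getD_cons_succ]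
        exact ih _ j' k' (by omega) (by simpa using hk)

theorem cntLE_le_length (l : List Int) (n : Int) : cntLE l n ≤ l.length := by
  induction l with
  | nil => simp [cntLE]
  | cons c rest ih => simp only [cntLE, List.length_cons]; split <;> omega

theorem cntLE_lt_imp (l : List Int) (n : Int) (j : Nat) (hj : j < cntLE l n) :
    l.getD j 0 ≤ n := by
  induction l generalizing j with
  | nil => simp [cntLE] at hj
  | cons c rest ih =>
    simp only [cntLE] at hj
    split at hj
    · cases j with
      | zero => simpa using ‹c ≤ n›
      | succ j' => simpa using ih j' (by omega)
    · omega

theorem cntLE_self (l : List Int) (n : Int) (h : cntLE l n < l.length) :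
    n < l.getD (cntLE l n) 0 := by
  induction l with
  | nil => simp at h
  | cons c rest ih =>
    by_cases hc : c ≤ n
    · simp only [cntLE, if_pos hc, List.length_cons] at h ⊢
      simp only [List.getD_cons_succ]
      exact ih (by omega)
    · simp only [cntLE, if_neg hc, List.getD_cons_zero]
      omega

theorem cntLE_small (gs : List (List Int)) (t n : Int) (hne : gs ≠ [])
    (h : n < t + sumLens gs) : cntLE (prefixB gs t) n < gs.length := by
  induction gs generalizing t with
  | nil => exact absurd rfl hne
  | cons g rest ih =>
    have hsum : sumLens (g :: rest) = (g.length : Int) + sumLens rest := by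
      simp [sumLens]
    by_cases hle : t + (g.length : Int) ≤ n
    · have hrest : rest ≠ [] := by
        rintro rfl
        simp [sumLens] at h hsum
        omega
      have := ih (t + (g.length : Int)) hrest (by rw [hsum] at h; omega)
      simp only [prefixB, cntLE, if_pos hle, List.length_cons]
      omega
    · simp [prefixB, cntLE, hle]

-- characterization of A's loop via the prefix list and cntLE
theorem goA_char (gs : List (List Int)) (n : Int) (i t : Int) :
    goA_findPos gs n i t =
      (if _h : cntLE (prefixB gs t) n < gs.length then
        some (i + (cntLE (prefixB gs t) n : Int),
          n - ((prefixB gs t).getD (cntLE (prefixB gs t) n) 0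
               - ((gs.getD (cntLE (prefixB gs t) n) []).length : Int)))
      else none) := by
  induction gs generalizing i t with
  | nil => simp [goA_findPos, prefixB, cntLE]
  | cons g rest ih =>
    by_cases hle : t + (g.length : Int) ≤ n
    · have hgoal : ¬ (t + (g.length : Int) > n) := by omega
      simp only [goA_findPos, if_neg hgoal, prefixB, cntLE, if_pos hle]
      rw [ih (i + 1) (t + (g.length : Int))]
      by_cases hc : cntLE (prefixB rest (t + (g.length : Int))) n < rest.length
      · rw [dif_pos hc, dif_pos (by simp only [List.length_cons]; omega)]
        simp only [List.getD_cons_succ]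
        congr 2
        push_cast; ring
      · rw [dif_neg hc, dif_neg (by simp only [List.length_cons]; omega)]
    · have hgt : t + (g.length : Int) > n := by omega
      simp only [goA_findPos, if_pos hgt, prefixB, cntLE, if_neg hle]
      rw [dif_pos (by simp)]
      simp
      ring
-- binary search lands exactly on K = cntLE when lo ≤ K ≤ hi ≤ length
theorem bsB_char (pfx : List Int) (n : Int) (lo hi : Nat)
    (h1 : lo ≤ cntLE pfx n) (h2 : cntLE pfx n ≤ hi) (h3 : hi ≤ pfx.length)
    (hmono : ∀ j k, j ≤ k → k < pfx.length → pfx.getD j 0 ≤ pfx.getD k 0) :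
    bsB pfx n lo hi = cntLE pfx n := by
  by_cases hlt : lo < hi
  · rw [bsB, dif_pos hlt]
    set mid := (lo + hi) / 2 with hmid
    have hmlo : lo ≤ mid := by omega
    have hmhi : mid < hi := by omega
    by_cases hgt : pfx.getD mid 0 > n
    · rw [if_pos hgt]
      have hKm : cntLE pfx n ≤ mid := by
        by_contra hc
        have := cntLE_lt_imp pfx n mid (by omega)
        omega
      exact bsB_char pfx n lo mid h1 hKm (by omega) hmono
    · rw [if_neg hgt]
      have hKm : mid + 1 ≤ cntLE pfx n := by
        by_contra hc
        have hKlen : cntLE pfx n < pfx.length := by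
          have := cntLE_le_length pfx n
          omega
        have hKv := cntLE_self pfx n hKlen
        have := hmono (cntLE pfx n) mid (by omega) (by omega)
        omega
      exact bsB_char pfx n (mid + 1) hi hKm h2 h3 hmono
  · rw [bsB, dif_neg hlt]; omega
termination_by hi - lo
decreasing_by
  · omega
  · omega

-- ===== VERDICT (by name: the statement is the Claim_ definition above) =====
theorem findPosInNoteGroups_py_spec : Claim_equal_findPosInNoteGroups_py := by
  intro gs n _
  unfold Spec_findPosInNoteGroups_py findPosInNoteGroups_py findPosInNoteGroups_py_alt
  cases hgs : gs with
  | nil =>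
    simp [prefixB, goA_findPos]
  | cons g rest =>
    dsimp only
    rw [getLast?_prefixB (g :: rest) 0 (by simp)]
    simp only [zero_add]
    have hsum : (List.map (fun x => ((x.length : Int))) (g :: rest)).sum
        = sumLens (g :: rest) := rfl
    rw [hsum]
    by_cases hge : n ≥ sumLens (g :: rest)
    · rw [if_pos hge, if_pos hge]
    · rw [if_neg hge, if_neg hge]
      have hK : cntLE (prefixB (g :: rest) 0) n < (g :: rest).length :=
        cntLE_small (g :: rest) 0 n (by simp) (by omega)
      rw [goA_char]
      rw [dif_pos hK]
      rw [bsB_char (prefixB (g :: rest) 0) n 0 (prefixB (g :: rest) 0).length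
        (by omega)
        (by rw [length_prefixB]; omega)
        (le_refl _)
        (fun j k hjk hk => mono_prefixB (g :: rest) 0 j k hjk
          (by rwa [length_prefixB] at hk))]
      simp
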